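-- pv_equiv track=rewrite | github.com/primrose101/CS322 | dataTypeLexer.py | falseBool_lexer
-- ===== SOURCE A (Python) =====
-- def falseBool_lexer(string_input, index):
--     i = index
--
--     state_table = [[1,6,6,6,6,6],
--                    [6,2,6,6,6,6],
--                    [6,6,3,6,6,6],
--                    [6,6,6,4,6,6],
--                    [6,6,6,6,5,6],
--                    [6,6,6,6,6,6],
--                    [6,6,6,6,6,6],]
--
--     state = 0
--     infut = 0
--
--     string_length = len(string_input)
--
--     while i != string_length:
--         if string_input[i] == 'f':
--             infut = 0
--         elif string_input[i] == 'a':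
--             infut = 1
--         elif string_input[i] == 'l':
--             infut = 2
--         elif string_input[i] == 's':
--             infut = 3
--         elif string_input[i] == 'e':
--             infut = 4
--         else:
--             infut = 5
--
--         state = state_table[state][infut]
--
--         if state == 6:
--             break
--
--         i += 1
--
--     return i
-- ===== SOURCE B (Python) =====
-- def falseBool_lexer(string_input, index):
--     i = index
--     n = len(string_input)
--     for ch in "false":
--         if i != n and string_input[i] == ch:
--             i += 1
--         else:
--             break
--     return i
-- ===== Notes on version B (the rewrite author's own statement) =====
-- stated objective: simpler
-- what changed: Replaced the 7x6 DFA state table, state variable and char-to-input-class if/elif chain with a direct cursor scan over the literal "false" (for ch in "false": advance while chars match).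
import Mathlib
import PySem

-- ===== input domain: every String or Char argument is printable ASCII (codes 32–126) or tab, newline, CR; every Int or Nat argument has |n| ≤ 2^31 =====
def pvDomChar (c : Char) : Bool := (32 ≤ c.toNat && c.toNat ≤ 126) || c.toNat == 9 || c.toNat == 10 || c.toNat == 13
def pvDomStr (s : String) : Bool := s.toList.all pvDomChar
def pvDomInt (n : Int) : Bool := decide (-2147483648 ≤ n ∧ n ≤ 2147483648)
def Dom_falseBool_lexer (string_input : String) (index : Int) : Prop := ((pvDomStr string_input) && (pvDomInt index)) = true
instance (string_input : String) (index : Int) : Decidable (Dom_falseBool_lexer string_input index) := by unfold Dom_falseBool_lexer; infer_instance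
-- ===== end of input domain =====

-- B replaces A's DFA state table with a direct cursor scan over the literal "false" (objective: simpler).

-- ===== PORT A =====
-- A's literal transition matrix.
def pvStateTable : List (List Int) :=
  [[1,6,6,6,6,6],
   [6,2,6,6,6,6],
   [6,6,3,6,6,6],
   [6,6,6,4,6,6],
   [6,6,6,6,5,6],
   [6,6,6,6,6,6],
   [6,6,6,6,6,6]]

-- state_table[state][infut]; state/infut are always in range in A, so the defaults are never used.
def pvTableGet (state infut : Int) : Int :=
  PySem.List.pyGetD (PySem.List.pyGetD pvStateTable state []) infut 6

-- A's if/elif chain computing infut.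
def pvInfut (c : Char) : Int :=
  if c = 'f' then 0 else if c = 'a' then 1 else if c = 'l' then 2
  else if c = 's' then 3 else if c = 'e' then 4 else 5

-- A's while loop; `none` from pyGet? is Python's IndexError (excluded by Pre_).
def pvALoop (cs : List Char) (state i : Int) : Int :=
  if _h : i = (cs.length : Int) then i
  else
    match hc : PySem.List.pyGet? cs i with
    | none => i   -- Python raises IndexError here (outside Pre_)
    | some c =>
      let infut : Int := pvInfut c
      let state' := pvTableGet state infut
      if state' = 6 then i else pvALoop cs state' (i + 1)
termination_by ((cs.length : Int) - i).toNat
decreasing_by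
  have hne : ¬ PySem.List.pyGet? cs i = none := by simp [hc]
  rw [PySem.List.pyGet?_eq_none_iff, not_not] at hne
  simp [PySem.Raise.InRange] at hne
  omega

def falseBool_lexer (string_input : String) (index : Int) : Int :=
  pvALoop string_input.toList 0 index

-- ===== PORT B =====
-- for ch in "false": if i != n and s[i] == ch: i += 1 else: break
def pvBLoop (cs : List Char) (target : List Char) (i : Int) : Int :=
  match target with
  | [] => i
  | ch :: rest =>
    if i ≠ (cs.length : Int) ∧ PySem.List.pyGet? cs i = some ch then
      pvBLoop cs rest (i + 1)
    else i

def falseBool_lexer_alt (string_input : String) (index : Int) : Int :=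
  pvBLoop string_input.toList "false".toList index

-- ===== PRECONDITION & SPEC =====
-- A raises IndexError exactly when the first access s[index] is out of range (index ≠ len);
-- all later accesses of either program are then automatically in range.
def Pre_falseBool_lexer (string_input : String) (index : Int) : Prop :=
  -(PySem.Str.len string_input) ≤ index ∧ index ≤ PySem.Str.len string_input

instance (string_input : String) (index : Int) : Decidable (Pre_falseBool_lexer string_input index) := by
  unfold Pre_falseBool_lexer; infer_instance

def pvWitness_falseBool_lexer : String × Int := ("false!", 0)

def Spec_falseBool_lexer (string_input : String) (index : Int) (out : Int) : Prop :=
  out = falseBool_lexer_alt string_input index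
instance (string_input : String) (index : Int) (out : Int) : Decidable (Spec_falseBool_lexer string_input index out) := by
  unfold Spec_falseBool_lexer; infer_instance

-- ===== CLAIM (what is proved, stated in full; the proofs are below) =====
def Claim_equal_falseBool_lexer : Prop := ∀ (string_input : String) (index : Int), Dom_falseBool_lexer string_input index → Pre_falseBool_lexer string_input index → Spec_falseBool_lexer string_input index (falseBool_lexer string_input index)

-- ===== LEMMAS AND PROOFS =====

-- The target literal, as a list.
theorem pvFalseList : "false".toList = ['f','a','l','s','e'] := rfl

-- One DFA step from state k ≤ 4: advance iff the char is the k-th letter of "false".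
theorem pvTable_step (k : Nat) (hk : k ≤ 4) (c : Char) :
    pvTableGet (k : Int) (pvInfut c) =
      if c = ['f','a','l','s','e'][k]'(by simp; omega) then ((k : Int) + 1) else 6 := by
  interval_cases k <;>
    (unfold pvInfut
     by_cases hf : c = 'f' <;> by_cases ha : c = 'a' <;> by_cases hl : c = 'l' <;>
       by_cases hs : c = 's' <;> by_cases he : c = 'e' <;>
     simp_all <;> decide)

-- From state 5 every char goes to the dead state 6.
theorem pvTable_five (c : Char) : pvTableGet 5 (pvInfut c) = 6 := by
  unfold pvInfut; split_ifs <;> decide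

-- In state k = 5 - j (fuel j), A's loop computes B's scan of the rest of "false".
theorem pvLoop_eq (cs : List Char) (j k : Nat) (hk : k + j = 5) (i : Int)
    (h1 : -(cs.length : Int) ≤ i) (h2 : i ≤ (cs.length : Int)) :
    pvALoop cs (k : Int) i = pvBLoop cs ("false".toList.drop k) i := by
  induction j generalizing k i with
  | zero =>
    -- k = 5: drop 5 = [], and A's row 5 is all 6
    have hk5 : k = 5 := by omega
    subst hk5
    rw [pvALoop, pvFalseList]
    by_cases hi : i = (cs.length : Int)
    · simp [hi, pvBLoop]
    · simp only [dif_neg hi, Nat.cast_ofNat]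
      cases hc : PySem.List.pyGet? cs i with
      | none => rfl
      | some c =>
        simp only []
        rw [pvTable_five]
        simp [pvBLoop]
  | succ j ih =>
    have hk4 : k ≤ 4 := by omega
    rw [pvALoop, pvFalseList]
    by_cases hi : i = (cs.length : Int)
    · -- both return i: B's guard i ≠ len fails (or target empty)
      subst hi
      simp only [dif_pos]
      cases (['f','a','l','s','e'].drop k) with
      | nil => rfl
      | cons ch rest => simp [pvBLoop]
    · simp only [dif_neg hi]
      have hin : PySem.Raise.InRange cs.length i := by
        simp [PySem.Raise.InRange]; omega
      cases hc : PySem.List.pyGet? cs i with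
      | none => exact absurd ((PySem.List.pyGet?_eq_none_iff (xs := cs) (i := i)).mp hc) (not_not_intro hin)
      | some c =>
        simp only []
        have hilt : i < (cs.length : Int) := lt_of_le_of_ne h2 hi
        rw [pvTable_step k hk4 c,
            List.drop_eq_getElem_cons (show k < ['f','a','l','s','e'].length by simp; omega)]
        by_cases hm : c = ['f','a','l','s','e'][k]'(by simp; omega)
        · rw [if_pos hm]
          have h6 : ¬ ((k : Int) + 1 = 6) := by omega
          rw [if_neg h6]
          have hcast : ((k : Int) + 1) = ((k + 1 : Nat) : Int) := by push_cast; ring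
          rw [hcast, ih (k + 1) (by omega) (i + 1) (by omega) (by omega)]
          have : pvBLoop cs (['f','a','l','s','e'][k]'(by simp; omega) :: ['f','a','l','s','e'].drop (k + 1)) i
              = pvBLoop cs (['f','a','l','s','e'].drop (k + 1)) (i + 1) := by
            rw [pvBLoop]
            rw [if_pos ⟨hi, by rw [hc, hm]⟩]
          rw [this, pvFalseList]
        · rw [if_neg hm, if_pos rfl, pvBLoop,
              if_neg (by rintro ⟨-, h⟩; rw [hc] at h; exact hm (Option.some_injective _ h))]

-- ===== VERDICT (by name: the statement is the Claim_ definition above) =====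
theorem falseBool_lexer_spec : Claim_equal_falseBool_lexer := by
  intro s index _ hpre
  unfold Spec_falseBool_lexer falseBool_lexer falseBool_lexer_alt
  have := pvLoop_eq s.toList 5 0 rfl index
    (by simpa [PySem.Str.len] using hpre.1) (by simpa [PySem.Str.len] using hpre.2)
  simpa using this
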